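-- pv_equiv track=rewrite | github.com/dietmarja/ECM | components/curriculum_generator/components/rich_content_extractor.py | _generate_assessment_weighting
-- ===== SOURCE A (Python) =====
-- from typing import Dict, List, Any, Optional, Set
--
-- def _generate_assessment_weighting(methods: List[str]) -> Dict:
--     """Generate assessment weighting distribution"""
--     if not methods:
--         return {"coursework": 100}
--
--     weightings = {}
--     weight_per_method = 100 // len(methods)
--     remainder = 100 % len(methods)
--
--     for i, method in enumerate(methods):
--         weight = weight_per_method + (1 if i < remainder else 0)
--         weightings[method] = weight
--
--     return weightings
-- ===== SOURCE B (Python) =====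
-- def _generate_assessment_weighting(methods):
--     """Generate assessment weighting distribution"""
--     if not methods:
--         return {"coursework": 100}
--
--     # fair division by shrinking budget: each method takes the ceiling of the
--     # remaining budget over the remaining count; no quotient/remainder precomputed
--     pairs = []
--     budget = 100
--     remaining = len(methods)
--     for m in methods:
--         share = -(-budget // remaining)
--         pairs.append((m, share))
--         budget -= share
--         remaining -= 1
--     return dict(pairs)
-- ===== Notes on version B (the rewrite author's own statement) =====
-- stated objective: alternative
-- what changed: Replaces A's precomputed quotient/remainder with a fair-division scheme over a shrinking budget: each method takes the ceiling of the remaining budget over the remaining count, so no remainder counter or per-index comparison exists.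
import Mathlib
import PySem

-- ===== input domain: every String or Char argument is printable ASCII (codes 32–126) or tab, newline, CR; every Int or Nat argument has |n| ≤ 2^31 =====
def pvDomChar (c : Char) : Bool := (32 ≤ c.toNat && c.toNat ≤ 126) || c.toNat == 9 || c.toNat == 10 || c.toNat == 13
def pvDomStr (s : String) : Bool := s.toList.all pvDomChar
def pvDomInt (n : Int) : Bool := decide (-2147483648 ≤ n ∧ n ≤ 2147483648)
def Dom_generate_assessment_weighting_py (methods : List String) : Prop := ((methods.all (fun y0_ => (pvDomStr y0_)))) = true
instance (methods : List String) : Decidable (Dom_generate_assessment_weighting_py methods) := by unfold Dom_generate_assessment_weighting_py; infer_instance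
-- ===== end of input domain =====

-- B replaces A's precomputed quotient/remainder loop with a recursive fair-division:
-- each step gives the head the ceiling of remaining-budget / remaining-count and
-- recurses with the reduced budget; objective: alternative (same cost).

-- ===== PORT A =====
def generate_assessment_weighting_py (methods : List String) : List (String × Int) :=
  if methods = [] then [("coursework", 100)]
  else
    let weight_per_method := PySem.Int.floordiv 100 (methods.length : Int)
    let remainder := PySem.Int.mod 100 (methods.length : Int)
    (((PySem.List.enumerate methods 0).foldl
        (fun (d : PySem.Dict String Int) p =>
          d.insert p.2 (weight_per_method + (if p.1 < remainder then 1 else 0)))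
        PySem.Dict.empty)).items

-- ===== PORT B =====
-- fair division over a shrinking budget: fold with state (pairs, budget, remaining)
def generate_assessment_weighting_py_alt (methods : List String) : List (String × Int) :=
  if methods = [] then [("coursework", 100)]
  else
    let fin := methods.foldl
      (fun (s : List (String × Int) × Int × Nat) m =>
        let share := -(PySem.Int.floordiv (-s.2.1) ((s.2.2 : Nat) : Int))
        (s.1 ++ [(m, share)], s.2.1 - share, s.2.2 - 1))
      ([], 100, methods.length)
    (PySem.Dict.ofList fin.1).items

-- ===== PRECONDITION & SPEC =====
def Spec_generate_assessment_weighting_py (methods : List String) (out : List (String × Int)) : Prop := out = generate_assessment_weighting_py_alt methods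
instance (methods : List String) (out : List (String × Int)) : Decidable (Spec_generate_assessment_weighting_py methods out) := by unfold Spec_generate_assessment_weighting_py; infer_instance

-- ===== CLAIM =====
def Claim_equal_generate_assessment_weighting_py : Prop := ∀ (methods : List String), Dom_generate_assessment_weighting_py methods → Spec_generate_assessment_weighting_py methods (generate_assessment_weighting_py methods)

-- ===== LEMMAS AND PROOFS =====

-- proof helper: the list of pairs B's loop accumulates, as a structural recursion
def pvSplit (ms : List String) (budget : Int) : List (String × Int) :=
  match ms with
  | [] => []
  | m :: rest =>
    let share := -(PySem.Int.floordiv (-budget) (((rest.length + 1 : Nat) : Int)))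
    (m, share) :: pvSplit rest (budget - share)


lemma pvSplit_length (ms : List String) (B : Int) : (pvSplit ms B).length = ms.length := by
  induction ms generalizing B with
  | nil => rfl
  | cons m rest ih => simp [pvSplit, ih]

-- the i-th pair of the recursive split is exactly A's quotient+remainder formula
lemma pvSplit_get (ms : List String) (B : Int) (i : Nat) (h : i < ms.length) :
    (pvSplit ms B)[i]'(by rw [pvSplit_length]; exact h)
      = (ms[i],
         PySem.Int.floordiv B (ms.length : Int)
           + (if (i : Int) < PySem.Int.mod B (ms.length : Int) then 1 else 0)) := by
  induction ms generalizing B i with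
  | nil => simp at h
  | cons m rest ih =>
    have hk : (0 : Int) < ((rest.length + 1 : Nat) : Int) := by positivity
    set k : Int := ((rest.length + 1 : Nat) : Int) with hkdef
    set q : Int := PySem.Int.floordiv B k with hq
    set r : Int := PySem.Int.mod B k with hr
    have hBqr : q * k + r = B := PySem.Int.floordiv_mul_add_mod B k
    have hr0 : 0 ≤ r := PySem.Int.mod_nonneg B hk
    have hrk : r < k := PySem.Int.mod_lt B hk
    have hshare : -(PySem.Int.floordiv (-B) k) = q + (if (0 : Int) < r then 1 else 0) := by
      rw [PySem.Int.neg_floordiv_neg_eq_iff_of_pos hk]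
      by_cases h0 : (0 : Int) < r <;> simp [h0] <;> constructor <;> nlinarith
    match i with
    | 0 =>
      simp only [pvSplit, List.getElem_cons_zero, List.length_cons]
      rw [hshare]
      simp [hq, hr, hkdef]
    | Nat.succ j =>
      have hj : j < rest.length := by simpa using h
      simp only [pvSplit, List.getElem_cons_succ]
      have hb : B - -(PySem.Int.floordiv (-B) (((rest.length + 1 : Nat) : Int)))
          = B - (q + (if (0 : Int) < r then 1 else 0)) := by rw [hshare]
      simp only [hb]
      rw [ih (B - (q + (if (0 : Int) < r then 1 else 0))) j hj]
      have hrestpos : (0 : Int) < ((rest.length : Nat) : Int) := by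
        have : 0 < rest.length := by omega
        exact_mod_cast this
      set k' : Int := ((rest.length : Nat) : Int) with hk'def
      have hkk' : k = k' + 1 := by simp [hkdef, hk'def]
      have hBqr' : q * k' + q + r = B := by
        rw [hkk'] at hBqr; ring_nf at hBqr ⊢; linarith
      -- compute floordiv/mod of the reduced budget over the shorter list
      have key : PySem.Int.floordiv (B - (q + (if (0:Int) < r then 1 else 0))) k' = q ∧
          PySem.Int.mod (B - (q + (if (0:Int) < r then 1 else 0))) k'
            = r - (if (0:Int) < r then 1 else 0) := by
        have hfd : PySem.Int.floordiv (B - (q + (if (0:Int) < r then 1 else 0))) k' = q := by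
          rw [PySem.Int.floordiv_eq_iff_of_pos hrestpos]
          by_cases h0 : (0 : Int) < r <;> simp [h0] <;> constructor <;> nlinarith
        refine ⟨hfd, ?_⟩
        have hmm := PySem.Int.floordiv_mul_add_mod (B - (q + (if (0:Int) < r then 1 else 0))) k'
        rw [hfd] at hmm
        by_cases h0 : (0 : Int) < r <;> simp [h0] at hmm ⊢ <;> nlinarith
      rw [key.1, key.2]
      have hQ : PySem.Int.floordiv B (((m :: rest).length : Nat) : Int) = q := by
        rw [hq, hkdef]; simp
      have hR : PySem.Int.mod B (((m :: rest).length : Nat) : Int) = r := by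
        rw [hr, hkdef]; simp
      rw [hQ, hR]
      congr 1
      by_cases h0 : (0 : Int) < r <;> simp only [h0, if_true, if_false] <;>
        split_ifs <;> omega

-- the split list equals the enumerate-map A's loop traverses
lemma pvSplit_eq_enum_map (ms : List String) :
    pvSplit ms 100
      = (PySem.List.enumerate ms 0).map
          (fun p => (p.2,
            PySem.Int.floordiv 100 (ms.length : Int)
              + (if (p.1 : Int) < PySem.Int.mod 100 (ms.length : Int) then 1 else 0))) := by
  apply List.ext_getElem
  · simp [pvSplit_length, PySem.List.length_enumerate]
  · intro i h1 h2
    have hi : i < ms.length := by rwa [pvSplit_length] at h1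
    rw [pvSplit_get ms 100 i hi]
    simp [PySem.List.getElem_enumerate]

-- B's loop accumulates exactly pvSplit
lemma pv_fold_eq_split (ms : List String) (acc : List (String × Int)) (B : Int) :
    (ms.foldl
      (fun (s : List (String × Int) × Int × Nat) m =>
        let share := -(PySem.Int.floordiv (-s.2.1) ((s.2.2 : Nat) : Int))
        (s.1 ++ [(m, share)], s.2.1 - share, s.2.2 - 1))
      (acc, B, ms.length)).1 = acc ++ pvSplit ms B := by
  induction ms generalizing acc B with
  | nil => simp [pvSplit]
  | cons m rest ih =>
    simp only [List.foldl_cons, List.length_cons]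
    rw [show rest.length + 1 - 1 = rest.length from rfl]
    rw [ih]
    simp [pvSplit]

-- ===== VERDICT =====
theorem generate_assessment_weighting_py_spec : Claim_equal_generate_assessment_weighting_py := by
  intro methods _
  unfold Spec_generate_assessment_weighting_py
  unfold generate_assessment_weighting_py generate_assessment_weighting_py_alt
  by_cases hnil : methods = []
  · simp [hnil]
  · simp only [if_neg hnil]
    have hofl : ∀ (ps : List (String × Int)),
        PySem.Dict.ofList ps = ps.foldl (fun d p => d.insert p.1 p.2) PySem.Dict.empty := by
      intro ps; simp [PySem.Dict.ofList, PySem.Dict.update]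
    rw [pv_fold_eq_split methods [] 100]
    simp only [List.nil_append]
    rw [hofl, pvSplit_eq_enum_map, List.foldl_map]
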